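-- pv_equiv track=rewrite | github.com/LeHuyHongNhat/Python-PTIT | PY01064_KiTuThuK.py | find_char
-- ===== SOURCE A (Python) =====
-- def find_char(N, K):
--     if N == 1:
--         return 'A'
--     mid = 2**(N-1)
--     if K == mid:
--         return chr(ord('A') + N - 1)
--     elif K < mid:
--         return find_char(N-1, K)
--     else:
--         return find_char(N-1, K-mid)
-- ===== SOURCE B (Python) =====
-- def find_char(N, K):
--     # Closed form: in the length-(2**N - 1) ruler string, the K-th character is
--     # 'A' + (number of trailing zero bits of K); out-of-range K answers 'A',
--     # exactly as A's leftover recursion does.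
--     if K <= 0 or K >= 2 ** N:
--         return 'A'
--     c = 0
--     while K % 2 == 0:
--         K //= 2
--         c += 1
--     return chr(ord('A') + c)
-- ===== Notes on version B (the rewrite author's own statement) =====
-- stated objective: faster
-- what changed: Replaces the N-deep recursion (which recomputes 2**(N-1) at every level) with the closed form: the K-th character is 'A' plus the trailing-zero count of K, computed by one small halving loop.
import Mathlib
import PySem

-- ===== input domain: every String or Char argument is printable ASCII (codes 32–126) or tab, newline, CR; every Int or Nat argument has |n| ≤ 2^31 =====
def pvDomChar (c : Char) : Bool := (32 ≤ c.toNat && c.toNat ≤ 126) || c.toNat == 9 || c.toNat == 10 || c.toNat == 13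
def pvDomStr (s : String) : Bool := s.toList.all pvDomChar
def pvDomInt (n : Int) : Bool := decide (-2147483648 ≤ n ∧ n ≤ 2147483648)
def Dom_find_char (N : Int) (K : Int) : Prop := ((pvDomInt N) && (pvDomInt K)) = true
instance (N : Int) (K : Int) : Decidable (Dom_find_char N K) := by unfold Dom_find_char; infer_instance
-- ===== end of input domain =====

-- B replaces A's N-deep recursion by the closed form 'A' + trailing-zero count of K (one halving loop).

-- ===== PORT A =====
-- Literal port of A's recursion. Python tests 'N == 1'; for N ≤ 0 the Python
-- never returns (it recurses forever: RecursionError), so those inputs are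
-- outside Pre_ and the Lean guard 'N ≤ 1' only serves termination there.
def find_char (N : Int) (K : Int) : String :=
  if N ≤ 1 then "A"
  else
    let mid : Int := 2 ^ (N - 1).toNat
    if K = mid then String.mk [Char.ofNat (65 + N - 1).toNat]
    else if K < mid then find_char (N - 1) K
    else find_char (N - 1) (K - mid)
termination_by N.toNat
decreasing_by all_goals omega

-- ===== PORT B =====
-- trailing-zero loop of Source B: 'while K % 2 == 0: K //= 2; c += 1'.
-- Python only enters it with K ≥ 1; the 'k ≠ 0' conjunct makes the Lean
-- recursion terminate on the unreachable k = 0.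
def ctzAux (k : Nat) (c : Nat) : Nat :=
  if h : k ≠ 0 ∧ k % 2 = 0 then ctzAux (k / 2) (c + 1) else c
termination_by k
decreasing_by exact Nat.div_lt_self (Nat.pos_of_ne_zero h.1) (by omega)

def find_char_alt (N : Int) (K : Int) : String :=
  if K ≤ 0 ∨ (2 : Int) ^ N.toNat ≤ K then "A"
  else String.mk [Char.ofNat (65 + ctzAux K.toNat 0)]

-- ===== PRECONDITION & SPEC =====
-- Pre_ excludes exactly N ≤ 0, on which A never returns: its recursion has no
-- base case there and Python raises RecursionError.
def Pre_find_char (N : Int) (K : Int) : Prop := 1 ≤ N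
instance (N : Int) (K : Int) : Decidable (Pre_find_char N K) := by unfold Pre_find_char; infer_instance

def pvWitness_find_char : Int × Int := (3, 5)

def Spec_find_char (N : Int) (K : Int) (out : String) : Prop := out = find_char_alt N K
instance (N : Int) (K : Int) (out : String) : Decidable (Spec_find_char N K out) := by unfold Spec_find_char; infer_instance

-- ===== CLAIM (what is proved, stated in full; the proofs are below) =====
def Claim_equal_find_char : Prop := ∀ (N : Int) (K : Int), Dom_find_char N K → Pre_find_char N K → Spec_find_char N K (find_char N K)

-- ===== LEMMAS AND PROOFS =====

theorem ctzAux_pow (m : Nat) : ∀ c : Nat, ctzAux (2 ^ m) c = c + m := by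
  induction m with
  | zero => intro c; rw [ctzAux]; simp
  | succ m ih =>
      intro c
      rw [ctzAux]
      have h2 : (2 : Nat) ^ (m + 1) ≠ 0 ∧ 2 ^ (m + 1) % 2 = 0 := by
        constructor
        · positivity
        · simp [pow_succ, Nat.mul_mod]
      rw [dif_pos h2]
      have : 2 ^ (m + 1) / 2 = 2 ^ m := by
        rw [pow_succ]; omega
      rw [this, ih]; omega

theorem ctzAux_add_pow (m : Nat) : ∀ k c : Nat, 0 < k → k < 2 ^ m →
    ctzAux (k + 2 ^ m) c = ctzAux k c := by
  induction m with
  | zero => intro k c hk hlt; omega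
  | succ m ih =>
      intro k c hk hlt
      rcases Nat.even_or_odd k with he | ho
      · -- k even: both recurse once
        obtain ⟨j, hj⟩ := he
        conv_lhs => rw [ctzAux]
        conv_rhs => rw [ctzAux]
        have hke : k % 2 = 0 := by omega
        have h1 : (k + 2 ^ (m + 1)) ≠ 0 ∧ (k + 2 ^ (m + 1)) % 2 = 0 := by
          constructor
          · omega
          · have : (2 : Nat) ^ (m + 1) % 2 = 0 := by simp [pow_succ, Nat.mul_mod]
            omega
        have h2 : k ≠ 0 ∧ k % 2 = 0 := ⟨by omega, hke⟩
        rw [dif_pos h1, dif_pos h2]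
        have hp : (2 : Nat) ^ (m + 1) = 2 ^ m * 2 := by rw [pow_succ]
        have hdiv : (k + 2 ^ (m + 1)) / 2 = k / 2 + 2 ^ m := by omega
        rw [hdiv]
        exact ih (k / 2) (c + 1) (by omega) (by omega)
      · -- k odd: both stop immediately
        conv_lhs => rw [ctzAux]
        conv_rhs => rw [ctzAux]
        have hko : k % 2 = 1 := Nat.odd_iff.mp ho
        have h1 : ¬((k + 2 ^ (m + 1)) ≠ 0 ∧ (k + 2 ^ (m + 1)) % 2 = 0) := by
          intro h
          have : (2 : Nat) ^ (m + 1) % 2 = 0 := by simp [pow_succ, Nat.mul_mod]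
          omega
        have h2 : ¬(k ≠ 0 ∧ k % 2 = 0) := by omega
        rw [dif_neg h1, dif_neg h2]

theorem find_char_low (n : Nat) : ∀ K : Int, K ≤ 0 → find_char (n : Int) K = "A" := by
  induction n with
  | zero => intro K _; rw [find_char]; simp
  | succ n ih =>
      intro K hK
      have hc : ((n + 1 : Nat) : Int) = (n : Int) + 1 := by push_cast; ring
      by_cases h1 : ((n : Int) + 1) ≤ 1
      · rw [find_char]; rw [hc]; simp [h1]
      · rw [find_char, hc]
        rw [if_neg (by push_cast; omega)]
        have hmid : (0 : Int) < 2 ^ (((n : Int) + 1) - 1).toNat := by positivity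
        rw [if_neg (by push_cast at hmid ⊢; omega)]
        rw [if_pos (by push_cast at hmid ⊢; omega)]
        have : ((n : Int) + 1) - 1 = (n : Int) := by omega
        rw [this]
        exact ih K hK

theorem find_char_high (n : Nat) : ∀ K : Int, (2 : Int) ^ n ≤ K → find_char (n : Int) K = "A" := by
  induction n with
  | zero => intro K _; rw [find_char]; simp
  | succ n ih =>
      intro K hK
      have hc : ((n + 1 : Nat) : Int) = (n : Int) + 1 := by push_cast; ring
      by_cases h1 : ((n : Int) + 1) ≤ 1
      · rw [find_char]; rw [hc]; simp [h1]
      · rw [find_char, hc]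
        rw [if_neg (by push_cast; omega)]
        have htn : (((n : Int) + 1) - 1).toNat = n := by omega
        have hp : (2 : Int) ^ (n + 1) = 2 ^ n * 2 := by ring
        have hmidK : (2 : Int) ^ n < K := by
          have h2 : (0 : Int) < 2 ^ n := by positivity
          rw [hp] at hK; omega
        rw [if_neg (by rw [htn]; omega)]
        rw [if_neg (by rw [htn]; omega)]
        rw [htn]
        have : ((n : Int) + 1) - 1 = (n : Int) := by omega
        rw [this]
        apply ih
        rw [hp] at hK
        have h2 : (0 : Int) < 2 ^ n := by positivity
        omega

theorem find_char_in (n : Nat) : ∀ K : Int, 1 ≤ K → K < (2 : Int) ^ n →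
    find_char (n : Int) K = String.mk [Char.ofNat (65 + ctzAux K.toNat 0)] := by
  induction n with
  | zero =>
      intro K h1 h2
      exfalso; norm_num at h2; omega
  | succ n ih =>
      intro K h1 h2
      have hcast : (2 : Int) ^ n = ((2 ^ n : Nat) : Int) := by push_cast; ring
      have hc : ((n + 1 : Nat) : Int) = (n : Int) + 1 := by push_cast; ring
      by_cases hn1 : ((n : Int) + 1) ≤ 1
      · -- n = 0, so K = 1
        have hn0 : n = 0 := by omega
        subst hn0
        have hK1 : K = 1 := by norm_num at h2; omega
        subst hK1
        rw [find_char, hc]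
        rw [if_pos hn1]
        rw [ctzAux]
        norm_num
        decide
      · rw [find_char, hc]
        rw [if_neg (by push_cast; omega)]
        have htn : (((n : Int) + 1) - 1).toNat = n := by omega
        rw [htn]
        have hstep : ((n : Int) + 1) - 1 = (n : Int) := by omega
        by_cases heq : K = (2 : Int) ^ n
        · rw [if_pos heq]
          have hKt : K.toNat = 2 ^ n := by rw [heq, hcast]; omega
          rw [hKt, ctzAux_pow]
          have : (65 + ((n : Int) + 1) - 1).toNat = 65 + (0 + n) := by omega
          rw [this]
        · rw [if_neg heq]
          by_cases hlt : K < (2 : Int) ^ n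
          · rw [if_pos hlt, hstep]
            exact ih K h1 hlt
          · rw [if_neg hlt, hstep]
            have hK' : 1 ≤ K - 2 ^ n := by omega
            have hK'2 : K - 2 ^ n < (2 : Int) ^ n := by
              have hp : (2 : Int) ^ (n + 1) = 2 ^ n * 2 := by ring
              rw [hp] at h2; omega
            rw [ih (K - 2 ^ n) hK' hK'2]
            have hsplit : K.toNat = (K - 2 ^ n).toNat + 2 ^ n := by
              rw [hcast] at heq hlt ⊢; omega
            rw [hsplit, ctzAux_add_pow n _ 0 (by rw [hcast] at hlt heq; omega)
              (by rw [hcast] at hK'2; omega)]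

-- ===== VERDICT (by name: the statement is the Claim_ definition above) =====
theorem find_char_spec : Claim_equal_find_char := by
  intro N K _ hPre
  unfold Spec_find_char find_char_alt
  have hn : N = ((N.toNat : Nat) : Int) := by unfold Pre_find_char at hPre; omega
  by_cases hK0 : K ≤ 0
  · rw [if_pos (Or.inl hK0), hn, find_char_low N.toNat K hK0]
  · by_cases hKhi : (2 : Int) ^ N.toNat ≤ K
    · rw [if_pos (Or.inr hKhi), hn, find_char_high N.toNat K hKhi]
    · rw [if_neg (by tauto), hn]
      exact find_char_in N.toNat K (by omega) (by omega)
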